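-- pv_equiv track=rewrite | github.com/yiyingyang/Facebook | 合集2.py | findKCommonHashAll
-- ===== SOURCE A (Python) =====
-- def findKCommonHashAll(arrays, k):
--     # hashmap
--     import collections
--     n = len(arrays)
--     maxLen = len(max(arrays, key = len))
--     count = collections.defaultdict(int)
--     for x in range(n):
--         for i in range(len(arrays[x])):
--             count[arrays[x][i]] += 1
--     for key in sorted(count):
--         if count[key] >= k: return key
--     return None
-- ===== SOURCE B (Python) =====
-- def findKCommonHashAll(arrays, k):
--     # Flatten everything, sort once, then a single pass counting runs of equal values;
--     # the first run of length >= k gives the smallest qualifying value.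
--     flat = []
--     for arr in arrays:
--         flat.extend(arr)
--     flat.sort()
--     if not flat:
--         return None
--     cur = flat[0]
--     run = 0
--     for v in flat:
--         if v == cur:
--             run += 1
--         else:
--             if run >= k:
--                 return cur
--             cur = v
--             run = 1
--     if run >= k:
--         return cur
--     return None
-- ===== Notes on version B (the rewrite author's own statement) =====
-- stated objective: alternative
-- what changed: Replaces the defaultdict counter plus sorted-keys scan by flatten-sort-once and a run-length scan over the sorted multiset, returning the first run of length >= k.
-- outside the precondition, e.g. on findKCommonHashAll([], 2): A raises ValueError, B returns None
import Mathlib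
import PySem

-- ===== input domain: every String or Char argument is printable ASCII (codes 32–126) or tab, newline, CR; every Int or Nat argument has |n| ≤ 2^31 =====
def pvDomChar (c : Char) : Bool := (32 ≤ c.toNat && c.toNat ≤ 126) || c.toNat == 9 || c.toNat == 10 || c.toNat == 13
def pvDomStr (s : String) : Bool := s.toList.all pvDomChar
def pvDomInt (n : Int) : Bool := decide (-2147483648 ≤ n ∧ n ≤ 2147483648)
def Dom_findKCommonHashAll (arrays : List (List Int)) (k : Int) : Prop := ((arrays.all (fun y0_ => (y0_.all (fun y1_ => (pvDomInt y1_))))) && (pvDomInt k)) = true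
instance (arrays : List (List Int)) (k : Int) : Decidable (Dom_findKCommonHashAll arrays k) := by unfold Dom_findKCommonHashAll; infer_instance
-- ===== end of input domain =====

-- B replaces A's defaultdict counter + sorted-keys scan by flatten, one sort, and a single-pass
-- run-length scan of the sorted multiset (objective: alternative algorithm of similar cost).
-- A's `maxLen = len(max(arrays, key=len))` line (otherwise unused) raises ValueError on arrays == [];
-- Pre_ excludes exactly that input, where B naturally returns None (see Raises_ block).

-- ===== PORT A =====
-- A's final loop `for key in sorted(count): if count[key] >= k: return key`:
def findKCommonLoopA (keys : List Int) (count : PySem.Dict Int Int) (k : Int) : Option Int :=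
  match keys with
  | [] => none
  | key :: rest => if count.getD key 0 ≥ k then some key else findKCommonLoopA rest count k

def findKCommonHashAll (arrays : List (List Int)) (k : Int) : Option Int :=
  -- maxLen = len(max(arrays, key=len)) raises on arrays = []; excluded by Pre_, its value is unused.
  let count : PySem.Dict Int Int :=
    (PySem.List.pyRange 0 (arrays.length : Int) 1).foldl (fun d x =>
      (PySem.List.pyRange 0 ((PySem.List.pyGetD arrays x []).length : Int) 1).foldl
        (fun d i => d.modify (PySem.List.pyGetD (PySem.List.pyGetD arrays x []) i 0) 0 (· + 1)) d)
      (PySem.Dict.empty : PySem.Dict Int Int)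
  findKCommonLoopA (PySem.List.sorted count.keys (fun key => key) false) count k

-- ===== PORT B =====
-- B's `for v in flat:` run-counting loop (cur = current value, run = its count so far):
def findKCommonRunLoop (k cur : Int) (run : Nat) : List Int → Option Int
  | [] => if (run : Int) ≥ k then some cur else none
  | v :: rest =>
    if v == cur then findKCommonRunLoop k cur (run + 1) rest
    else if (run : Int) ≥ k then some cur
    else findKCommonRunLoop k v 1 rest

def findKCommonHashAll_alt (arrays : List (List Int)) (k : Int) : Option Int :=
  let flat := arrays.foldl (fun acc arr => acc ++ arr) []
  let sortedFlat := PySem.List.sorted flat (fun x => x) false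
  match sortedFlat with
  | [] => none
  | x :: _ => findKCommonRunLoop k x 0 sortedFlat

-- ===== PRECONDITION & SPEC =====
-- Pre_ excludes only arrays = [], where A's max(arrays, key=len) raises ValueError.
def Pre_findKCommonHashAll (arrays : List (List Int)) (k : Int) : Prop := arrays ≠ []
instance (arrays : List (List Int)) (k : Int) : Decidable (Pre_findKCommonHashAll arrays k) := by unfold Pre_findKCommonHashAll; infer_instance

def pvWitness_findKCommonHashAll : List (List Int) × Int := ([[1, 2], [2, 3]], 2)

def Spec_findKCommonHashAll (arrays : List (List Int)) (k : Int) (out : Option Int) : Prop := out = findKCommonHashAll_alt arrays k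
instance (arrays : List (List Int)) (k : Int) (out : Option Int) : Decidable (Spec_findKCommonHashAll arrays k out) := by unfold Spec_findKCommonHashAll; infer_instance

-- ===== CLAIM (what is proved, stated in full; the proofs are below) =====
def Claim_equal_findKCommonHashAll : Prop := ∀ (arrays : List (List Int)) (k : Int), Dom_findKCommonHashAll arrays k → Pre_findKCommonHashAll arrays k → Spec_findKCommonHashAll arrays k (findKCommonHashAll arrays k)

-- ===== LEMMAS AND PROOFS =====

-- B's scan, started at the head of a nonempty list.
def pvScanTop (k : Int) (l : List Int) : Option Int :=
  match l with
  | [] => none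
  | x :: xs => findKCommonRunLoop k x 1 xs

-- The run loop eats the maximal equal prefix of its current value in one conceptual step.
theorem pv_runLoop_eats (k cur : Int) : ∀ (xs : List Int) (run : Nat),
    findKCommonRunLoop k cur run xs =
      (if ((run + (xs.takeWhile (· == cur)).length : Nat) : Int) ≥ k then some cur
       else pvScanTop k (xs.dropWhile (· == cur))) := by
  intro xs
  induction xs with
  | nil => intro run; simp [findKCommonRunLoop, pvScanTop]
  | cons v vs ih =>
    intro run
    by_cases hv : v = cur
    · subst hv
      rw [findKCommonRunLoop, if_pos (by simp), ih (run + 1),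
        List.takeWhile_cons_of_pos (by simp), List.dropWhile_cons_of_pos (by simp)]
      simp only [List.length_cons]
      congr 2
      omega
    · rw [findKCommonRunLoop, if_neg (by simp [hv]),
        List.takeWhile_cons_of_neg (by simp [hv]), List.dropWhile_cons_of_neg (by simp [hv])]
      simp [pvScanTop]

-- In a nondecreasing list whose elements are all ≥ x, x does not survive dropWhile (· == x).
theorem pv_not_mem_dropWhile (x : Int) : ∀ (xs : List Int), xs.Pairwise (· ≤ ·) →
    (∀ y ∈ xs, x ≤ y) → x ∉ xs.dropWhile (· == x) := by
  intro xs
  induction xs with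
  | nil => simp
  | cons y ys ih =>
    intro hp hge
    by_cases hy : y = x
    · subst hy
      rw [List.dropWhile_cons_of_pos (by simp)]
      exact ih hp.of_cons (fun z hz => hge z (List.mem_cons_of_mem _ hz))
    · rw [List.dropWhile_cons_of_neg (by simp [hy])]
      intro hmem
      rcases List.mem_cons.mp hmem with h | h
      · exact hy h.symm
      · have h1 : y ≤ x := (List.pairwise_cons.mp hp).1 x h
        have h2 : x ≤ y := hge y List.mem_cons_self
        exact hy (le_antisymm h1 h2)

-- Run-length of the head of a nondecreasing list is its multiplicity.
theorem pv_count_head (x : Int) (xs : List Int) (hp : (x :: xs).Pairwise (· ≤ ·)) :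
    ((x :: xs).count x : Int) = 1 + (xs.takeWhile (· == x)).length := by
  have hsplit : xs = xs.takeWhile (· == x) ++ xs.dropWhile (· == x) :=
    (List.takeWhile_append_dropWhile).symm
  have hd0 : (xs.dropWhile (· == x)).count x = 0 := by
    rw [List.count_eq_zero]
    exact pv_not_mem_dropWhile x xs hp.of_cons (fun y hy => (List.pairwise_cons.mp hp).1 y hy)
  have ht : (xs.takeWhile (· == x)).count x = (xs.takeWhile (· == x)).length := by
    rw [List.count_eq_length]
    intro b hb
    have hbx := List.mem_takeWhile_imp (p := fun y => y == x) hb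
    exact ((beq_iff_eq).mp hbx).symm
  rw [List.count_cons_self]
  conv_lhs => rw [hsplit]
  rw [List.count_append, hd0, ht]
  push_cast
  ring

-- For v ≠ x, dropping the head-run of x does not change multiplicities.
theorem pv_count_tail (x v : Int) (hv : v ≠ x) (xs : List Int) :
    (x :: xs).count v = (xs.dropWhile (· == x)).count v := by
  have hsplit : xs = xs.takeWhile (· == x) ++ xs.dropWhile (· == x) :=
    (List.takeWhile_append_dropWhile).symm
  have ht : (xs.takeWhile (· == x)).count v = 0 := by
    rw [List.count_eq_zero]
    intro hmem
    have := List.mem_takeWhile_imp hmem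
    simp at this
    exact hv this
  rw [List.count_cons]
  conv_lhs => rw [hsplit]
  rw [List.count_append, ht]
  simp [Ne.symm hv]

-- Main bridge: A's scan over the sorted distinct keys equals B's run-length scan over the
-- sorted multiset, whenever the dict stores the multiplicities.
theorem pv_main (k : Int) (c : PySem.Dict Int Int) : ∀ (n : Nat) (l K : List Int),
    l.length ≤ n → l.Pairwise (· ≤ ·) → K.Pairwise (· < ·) →
    (∀ v, v ∈ K ↔ v ∈ l) → (∀ v ∈ K, c.getD v 0 = l.count v) →
    findKCommonLoopA K c k = pvScanTop k l := by
  intro n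
  induction n with
  | zero =>
    intro l K hn _ _ hmem _
    have hl : l = [] := List.eq_nil_of_length_eq_zero (Nat.le_zero.mp hn)
    subst hl
    have hK : K = [] := by
      cases K with
      | nil => rfl
      | cons m K' => exact absurd ((hmem m).mp List.mem_cons_self) (by simp)
    subst hK
    simp [findKCommonLoopA, pvScanTop]
  | succ n ih =>
    intro l K hn hpl hpK hmem hcnt
    cases l with
    | nil =>
      have hK : K = [] := by
        cases K with
        | nil => rfl
        | cons m K' => exact absurd ((hmem m).mp List.mem_cons_self) (by simp)
      subst hK
      simp [findKCommonLoopA, pvScanTop]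
    | cons x xs =>
      cases K with
      | nil => exact absurd ((hmem x).mpr List.mem_cons_self) (by simp)
      | cons m K' =>
        -- the head of K is x (each is the minimum of the same set of values)
        have hxm : m = x := by
          have hml : m ∈ x :: xs := (hmem m).mp List.mem_cons_self
          have hxle : x ≤ m := by
            rcases List.mem_cons.mp hml with h | h
            · exact le_of_eq h.symm
            · exact (List.pairwise_cons.mp hpl).1 m h
          have hxK : x ∈ m :: K' := (hmem x).mpr List.mem_cons_self
          rcases List.mem_cons.mp hxK with h | h
          · exact h.symm
          · exact absurd ((List.pairwise_cons.mp hpK).1 x h) (not_lt.mpr hxle)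
        subst hxm
        set t := xs.takeWhile (· == m) with hdt
        set d := xs.dropWhile (· == m) with hdd
        have hcx : c.getD m 0 = (1 + t.length : Int) := by
          rw [hcnt m List.mem_cons_self]
          exact pv_count_head m xs hpl
        have hB : pvScanTop k (m :: xs) =
            (if ((1 + t.length : Nat) : Int) ≥ k then some m else pvScanTop k d) := by
          rw [pvScanTop, pv_runLoop_eats]
        rw [findKCommonLoopA, hB, hcx]
        have hcast : ((1 + t.length : Nat) : Int) = (1 + t.length : Int) := by push_cast; ring
        rw [hcast]
        by_cases hk : (1 + t.length : Int) ≥ k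
        · simp [hk]
        · simp only [hk, ite_false]
          have hsplit : xs = t ++ d := (List.takeWhile_append_dropWhile).symm
          have hmnotd : m ∉ d := pv_not_mem_dropWhile m xs hpl.of_cons
            (fun y hy => (List.pairwise_cons.mp hpl).1 y hy)
          refine ih d K' ?_ ?_ (hpK.of_cons) ?_ ?_
          · have h1 : d.length ≤ xs.length := (xs.dropWhile_sublist (p := (· == m))).length_le
            have h2 := hn
            simp only [List.length_cons] at h2
            omega
          · exact (hpl.of_cons).sublist (xs.dropWhile_sublist (p := (· == m)))
          · intro v
            constructor
            · intro hvK'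
              have hvm : v ≠ m := by
                intro h; subst h
                exact absurd ((List.pairwise_cons.mp hpK).1 v hvK') (lt_irrefl v)
              have hvl : v ∈ m :: xs := (hmem v).mp (List.mem_cons_of_mem _ hvK')
              have hvxs : v ∈ xs := by
                rcases List.mem_cons.mp hvl with h | h
                · exact absurd h hvm
                · exact h
              rw [hsplit] at hvxs
              rcases List.mem_append.mp hvxs with h | h
              · exact absurd (by simpa using List.mem_takeWhile_imp h) hvm
              · exact h
            · intro hvd
              have hvm : v ≠ m := fun h => hmnotd (h ▸ hvd)
              have hvxs : v ∈ xs := by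
                rw [hsplit]; exact List.mem_append.mpr (Or.inr hvd)
              have hvK : v ∈ m :: K' := (hmem v).mpr (List.mem_cons_of_mem _ hvxs)
              rcases List.mem_cons.mp hvK with h | h
              · exact absurd h hvm
              · exact h
          · intro v hvK'
            have hvm : v ≠ m := by
              intro h; subst h
              exact absurd ((List.pairwise_cons.mp hpK).1 v hvK') (lt_irrefl v)
            rw [hcnt v (List.mem_cons_of_mem _ hvK'), pv_count_tail m v hvm xs]

-- B's port equals pvScanTop of the sorted flat list (the run loop's first step absorbs the head).
theorem pv_alt_eq_scanTop (arrays : List (List Int)) (k : Int) :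
    findKCommonHashAll_alt arrays k =
      pvScanTop k (PySem.List.sorted (arrays.foldl (fun acc arr => acc ++ arr) []) (fun x => x) false) := by
  unfold findKCommonHashAll_alt
  cases h : PySem.List.sorted (arrays.foldl (fun acc arr => acc ++ arr) []) (fun x => x) false with
  | nil => simp [h, pvScanTop]
  | cons x xs => simp [h, pvScanTop, findKCommonRunLoop]

-- A's nested index-loop counter equals Counter(flatten(arrays)).
theorem pv_count_eq (arrays : List (List Int)) :
    (PySem.List.pyRange 0 (arrays.length : Int) 1).foldl (fun d x =>
      (PySem.List.pyRange 0 ((PySem.List.pyGetD arrays x []).length : Int) 1).foldl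
        (fun d i => d.modify (PySem.List.pyGetD (PySem.List.pyGetD arrays x []) i 0) 0 (· + 1)) d)
      PySem.Dict.empty = PySem.Dict.counter arrays.flatten := by
  have h1 := PySem.List.foldl_pyRange_zero_pyGetD' arrays []
    (fun acc arr => (PySem.List.pyRange 0 (arr.length : Int) 1).foldl
      (fun d i => d.modify (PySem.List.pyGetD arr i 0) 0 (· + 1)) acc) (PySem.Dict.empty : PySem.Dict Int Int)
  have h2 := PySem.List.foldl_congr_mem
    (l := arrays) (init := (PySem.Dict.empty : PySem.Dict Int Int))
    (f := fun acc arr => (PySem.List.pyRange 0 (arr.length : Int) 1).foldl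
      (fun d i => d.modify (PySem.List.pyGetD arr i 0) 0 (· + 1)) acc)
    (g := fun d arr => arr.foldl (fun d v => d.modify v 0 (· + 1)) d)
    (by intro acc arr _
        exact PySem.List.foldl_pyRange_zero_pyGetD' arr 0 (fun d v => d.modify v 0 (· + 1)) acc)
  have h3 : arrays.foldl (fun d arr => arr.foldl (fun d v => d.modify v 0 (· + 1)) d)
      PySem.Dict.empty = PySem.Dict.counter arrays.flatten :=
    (List.foldl_flatten).symm
  exact h1.trans (h2.trans h3)

-- ===== VERDICT (by name: the statement is the Claim_ definition above) =====
theorem findKCommonHashAll_spec : Claim_equal_findKCommonHashAll := by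
  intro arrays k _ _
  unfold Spec_findKCommonHashAll
  rw [pv_alt_eq_scanTop]
  have hflat : arrays.foldl (fun acc arr => acc ++ arr) [] = arrays.flatten := by
    rw [PySem.List.foldl_append_eq_flatMap]
    simp
  rw [hflat]
  unfold findKCommonHashAll
  simp only [pv_count_eq]
  set flat := arrays.flatten with hf
  exact pv_main k (PySem.Dict.counter flat)
    (PySem.List.sorted flat (fun x => x) false).length
    (PySem.List.sorted flat (fun x => x) false)
    (PySem.List.sorted (PySem.Dict.counter flat).keys (fun key => key) false)
    (le_refl _)
    (PySem.List.sorted_pairwise flat (fun x => x))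
    (by rw [PySem.Dict.keys_counter]; exact PySem.List.sorted_ofList_pairwise_lt flat)
    (by intro v
        rw [PySem.List.mem_sorted, PySem.List.mem_sorted, PySem.Dict.keys_counter,
          PySem.Set.mem_ofList])
    (by intro v _
        rw [PySem.Dict.getD_counter,
          List.Perm.count_eq (PySem.List.sorted_perm flat (fun x => x) false).symm])
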